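-- pv_equiv track=rewrite | github.com/demisto/demisto-sdk | demisto_sdk/commands/common/hook_validations/deprecation.py | validate_integration_commands_not_in_playbook
-- ===== SOURCE A (Python) =====
-- from typing import Dict, List, Optional
--
-- def validate_integration_commands_not_in_playbook(
--
--     usage_dict: Dict,
--     deprecated_commands_list: List[str],
--     command_to_integration: Dict[str, list],
--     playbook: Dict,
--     integration_id: str,
-- ):
--     """
--     List all the integration commands of the current checked integration that are being used in the given playbook.
--     and update them in the given usage_dict.
--
--     Args:
--         deprecated_commands_list (list): A list of all the integration's deprecated commands.
--         usage_dict (dict): A dictionary where the keys are the integartion's deprecated commands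
--         that are used in none-deprecated scripts / playbooks.
--         The values are the file names where they're being used.
--         command_to_integration(dict) A dict where the keys are the integartions commands that are being used
--         and the value is the integration name.
--         playbook (dict): The playbook currently being checked.
--         integration_id (str): The id of the integration that is currently being tested.
--     """
--     for command, integration_name in command_to_integration.items():
--         if command in deprecated_commands_list:
--             if integration_name == integration_id or not integration_name:
--                 playbook_path: Optional[str] = playbook.get("file_path", "")
--                 if command in usage_dict and playbook_path not in usage_dict.get(
--                     command, []
--                 ):
--                     usage_dict.get(command, []).append(playbook_path)
--                 if command not in usage_dict:
--                     usage_dict[command] = [playbook_path]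
--     return usage_dict
-- ===== SOURCE B (Python) =====
-- def validate_integration_commands_not_in_playbook(
--     usage_dict,
--     deprecated_commands_list,
--     command_to_integration,
--     playbook,
--     integration_id,
-- ):
--     path = playbook.get("file_path", "")
--     # the commands of interest: deprecated and mapped to this (or an unnamed) integration
--     active = {
--         command
--         for command, name in command_to_integration.items()
--         if command in deprecated_commands_list and (name == integration_id or not name)
--     }
--     existing = list(usage_dict)
--     # one pass over the existing entries: record the playbook path where missing
--     for command in existing:
--         if command in active and path not in usage_dict[command]:
--             usage_dict[command].append(path)
--     # one pass over the integration map: add fresh entries in its order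
--     for command in command_to_integration:
--         if command in active and command not in existing:
--             usage_dict[command] = [path]
--     return usage_dict
-- ===== Notes on version B (the rewrite author's own statement) =====
-- stated objective: alternative
-- what changed: A runs one stateful loop over command_to_integration mutating usage_dict entry by entry; B first computes the set of active deprecated commands and then does two independent passes: a map over the existing usage_dict entries to record the playbook path, and a filter over the integration map's keys to append the fresh entries.
import Mathlib
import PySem

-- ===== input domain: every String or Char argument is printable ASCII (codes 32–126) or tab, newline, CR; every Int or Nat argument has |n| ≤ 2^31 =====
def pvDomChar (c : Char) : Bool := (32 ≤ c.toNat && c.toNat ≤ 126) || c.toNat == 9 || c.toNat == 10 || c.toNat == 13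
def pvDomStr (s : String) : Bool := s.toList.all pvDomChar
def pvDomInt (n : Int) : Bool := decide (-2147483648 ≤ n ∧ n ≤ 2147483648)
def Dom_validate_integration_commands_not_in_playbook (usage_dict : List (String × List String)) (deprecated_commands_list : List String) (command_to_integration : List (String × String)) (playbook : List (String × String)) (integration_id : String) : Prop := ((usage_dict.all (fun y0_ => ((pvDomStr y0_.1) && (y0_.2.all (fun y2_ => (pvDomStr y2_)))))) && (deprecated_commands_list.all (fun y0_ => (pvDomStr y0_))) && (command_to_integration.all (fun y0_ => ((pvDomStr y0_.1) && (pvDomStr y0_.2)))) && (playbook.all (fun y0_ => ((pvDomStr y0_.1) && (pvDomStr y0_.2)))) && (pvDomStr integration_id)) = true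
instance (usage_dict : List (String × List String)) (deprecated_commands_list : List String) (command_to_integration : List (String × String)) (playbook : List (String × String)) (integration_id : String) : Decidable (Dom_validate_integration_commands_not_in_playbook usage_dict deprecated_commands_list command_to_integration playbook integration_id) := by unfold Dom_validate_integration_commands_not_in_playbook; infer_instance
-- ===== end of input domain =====

-- B replaces A's single stateful loop over the integration map by a precomputed set of
-- "active" commands plus two independent passes (update existing entries, then append the
-- fresh ones); objective: alternative decomposition, same cost. Both the Python A and the
-- Python B mutate usage_dict in place; the equivalence proved here is about the return value.


-- ===== PORT A =====
-- one iteration of A's loop body (command, integration_name) over the usage dict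
def pvAStep (deprecated_commands_list : List String) (playbook : List (String × String))
    (integration_id : String) (d : PySem.Dict String (List String)) (kv : String × String) :
    PySem.Dict String (List String) :=
  if deprecated_commands_list.contains kv.1 then
    if kv.2 == integration_id || kv.2 == "" then
      let playbook_path := (PySem.Dict.mk playbook).getD "file_path" ""
      let d := if d.contains kv.1 && !((d.getD kv.1 []).contains playbook_path)
               then d.modify kv.1 [] (fun v => v ++ [playbook_path]) else d
      if d.contains kv.1 then d else d.insert kv.1 [playbook_path]
    else d
  else d

def validate_integration_commands_not_in_playbook (usage_dict : List (String × List String)) (deprecated_commands_list : List String) (command_to_integration : List (String × String)) (playbook : List (String × String)) (integration_id : String) : List (String × List String) :=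
  (command_to_integration.foldl (pvAStep deprecated_commands_list playbook integration_id)
    (PySem.Dict.mk usage_dict)).items

-- ===== PORT B =====
def validate_integration_commands_not_in_playbook_alt (usage_dict : List (String × List String)) (deprecated_commands_list : List String) (command_to_integration : List (String × String)) (playbook : List (String × String)) (integration_id : String) : List (String × List String) :=
  let path := (PySem.Dict.mk playbook).getD "file_path" ""
  let active : PySem.Set String :=
    PySem.Set.ofList ((command_to_integration.filter (fun kv =>
      deprecated_commands_list.contains kv.1 && (kv.2 == integration_id || kv.2 == ""))).map Prod.fst)
  let existing := usage_dict.map Prod.fst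
  (usage_dict.map (fun kv =>
      if PySem.Set.contains active kv.1 && !(kv.2.contains path) then (kv.1, kv.2 ++ [path]) else kv))
  ++ ((command_to_integration.map Prod.fst).filter (fun c =>
        PySem.Set.contains active c && !(existing.contains c))).map (fun c => (c, [path]))

-- ===== PRECONDITION & SPEC =====
-- Pre_ excludes association lists with duplicate keys in usage_dict or command_to_integration:
-- those arguments stand for Python dicts, whose keys are unique, so a duplicate-key list has
-- no Python counterpart (on such lists the two ports may treat the duplicates differently).
def Pre_validate_integration_commands_not_in_playbook (usage_dict : List (String × List String)) (deprecated_commands_list : List String) (command_to_integration : List (String × String)) (playbook : List (String × String)) (integration_id : String) : Prop :=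
  (usage_dict.map Prod.fst).Nodup ∧ (command_to_integration.map Prod.fst).Nodup
instance (usage_dict : List (String × List String)) (deprecated_commands_list : List String) (command_to_integration : List (String × String)) (playbook : List (String × String)) (integration_id : String) : Decidable (Pre_validate_integration_commands_not_in_playbook usage_dict deprecated_commands_list command_to_integration playbook integration_id) := by unfold Pre_validate_integration_commands_not_in_playbook; infer_instance

def pvWitness_validate_integration_commands_not_in_playbook : (List (String × List String)) × List String × (List (String × String)) × (List (String × String)) × String :=
  ([("cmd-old", ["other.yml"])], ["cmd-old", "cmd-new"], [("cmd-new", "intg"), ("other", "x")], [("file_path", "pb.yml")], "intg")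

def Spec_validate_integration_commands_not_in_playbook (usage_dict : List (String × List String)) (deprecated_commands_list : List String) (command_to_integration : List (String × String)) (playbook : List (String × String)) (integration_id : String) (out : List (String × List String)) : Prop := out = validate_integration_commands_not_in_playbook_alt usage_dict deprecated_commands_list command_to_integration playbook integration_id
instance (usage_dict : List (String × List String)) (deprecated_commands_list : List String) (command_to_integration : List (String × String)) (playbook : List (String × String)) (integration_id : String) (out : List (String × List String)) : Decidable (Spec_validate_integration_commands_not_in_playbook usage_dict deprecated_commands_list command_to_integration playbook integration_id out) := by unfold Spec_validate_integration_commands_not_in_playbook; infer_instance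

-- ===== CLAIM (what is proved, stated in full; the proofs are below) =====
def Claim_equal_validate_integration_commands_not_in_playbook : Prop := ∀ (usage_dict : List (String × List String)) (deprecated_commands_list : List String) (command_to_integration : List (String × String)) (playbook : List (String × String)) (integration_id : String), Dom_validate_integration_commands_not_in_playbook usage_dict deprecated_commands_list command_to_integration playbook integration_id → Pre_validate_integration_commands_not_in_playbook usage_dict deprecated_commands_list command_to_integration playbook integration_id → Spec_validate_integration_commands_not_in_playbook usage_dict deprecated_commands_list command_to_integration playbook integration_id (validate_integration_commands_not_in_playbook usage_dict deprecated_commands_list command_to_integration playbook integration_id)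

-- ===== LEMMAS AND PROOFS =====

-- the per-command "active" test
def pvPred (dep : List String) (iid : String) (kv : String × String) : Bool :=
  dep.contains kv.1 && (kv.2 == iid || kv.2 == "")

-- boolean membership in the set of active commands of c2i
def pvAct (dep : List String) (iid : String) (c2i : List (String × String)) (x : String) : Bool :=
  ((c2i.filter (pvPred dep iid)).map Prod.fst).contains x

lemma pvAct_cons (dep : List String) (iid : String) (kv : String × String)
    (rest : List (String × String)) (x : String) :
    pvAct dep iid (kv :: rest) x
      = ((pvPred dep iid kv && (kv.1 == x)) || pvAct dep iid rest x) := by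
  have hswap : (x == kv.1) = (kv.1 == x) := by
    by_cases hab : x = kv.1
    · rw [hab]
    · rw [beq_eq_false_iff_ne.mpr hab, beq_eq_false_iff_ne.mpr (Ne.symm hab)]
  by_cases h : pvPred dep iid kv = true <;> simp [pvAct, h, hswap]

lemma pvAct_false (dep : List String) (iid : String) (rest : List (String × String))
    (x : String) (hx : x ∉ rest.map Prod.fst) : pvAct dep iid rest x = false := by
  have : x ∉ (rest.filter (pvPred dep iid)).map Prod.fst := fun hmem => hx (by
    obtain ⟨p, hp, hpx⟩ := List.mem_map.mp hmem
    exact List.mem_map.mpr ⟨p, List.mem_of_mem_filter hp, hpx⟩)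
  simpa [pvAct] using this

lemma pvTail (dep : List String) (iid : String) (k v : String)
    (rest : List (String × String)) (keys : List String) (hk : k ∉ rest.map Prod.fst) :
    (rest.map Prod.fst).filter (fun c => pvAct dep iid ((k, v) :: rest) c && !(keys.contains c))
      = (rest.map Prod.fst).filter (fun c => pvAct dep iid rest c && !(keys.contains c)) := by
  apply List.filter_congr
  intro c hcmem
  have hck : ¬(k == c) = true := fun h => hk (by rw [eq_of_beq h]; exact hcmem)
  simp [pvAct_cons, hck]

lemma pvMain (dep : List String) (pb : List (String × String)) (iid : String)
    (path : String) (hpath : path = (PySem.Dict.mk pb).getD "file_path" "") :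
    ∀ (c2i : List (String × String)) (d : PySem.Dict String (List String)),
    d.keys.Nodup → (c2i.map Prod.fst).Nodup →
    (c2i.foldl (pvAStep dep pb iid) d).items =
      d.items.map (fun kv =>
        if pvAct dep iid c2i kv.1 && !(kv.2.contains path) then (kv.1, kv.2 ++ [path]) else kv)
      ++ ((c2i.map Prod.fst).filter (fun c =>
            pvAct dep iid c2i c && !(d.keys.contains c))).map (fun c => (c, [path])) := by
  intro c2i
  induction c2i with
  | nil =>
    intro d _ _
    simp [pvAct]
  | cons kv rest ih =>
    obtain ⟨k, v⟩ := kv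
    intro d hnd hc2i
    have hk : k ∉ rest.map Prod.fst := (List.nodup_cons.mp (by simpa using hc2i)).1
    have hrest : (rest.map Prod.fst).Nodup := (List.nodup_cons.mp (by simpa using hc2i)).2
    have hactk : pvAct dep iid rest k = false := pvAct_false dep iid rest k hk
    by_cases hp : pvPred dep iid (k, v) = true
    · -- the head command is active
      have hstep : pvAStep dep pb iid d (k, v) =
          (let d1 := if d.contains k && !((d.getD k []).contains path)
                     then d.modify k [] (fun w => w ++ [path]) else d
           if d1.contains k then d1 else d1.insert k [path]) := by
        have h1 := (Bool.and_eq_true _ _).mp hp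
        simp only [pvAStep, h1.1, h1.2, ← hpath]
        simp
      by_cases hc : d.contains k = true
      · -- the command already has an entry
        by_cases hmem : path ∈ d.getD k []
        · -- and the path is already recorded: no change
          have hstep' : pvAStep dep pb iid d (k, v) = d := by
            rw [hstep]
            have hcond : (d.contains k && !(d.getD k []).contains path) = false := by
              simp [hc, hmem]
            simp only [hcond]
            simp [hc]
          rw [List.foldl_cons, hstep', ih d hnd hrest]
          congr 1
          · apply List.map_congr_left
            intro p hpmem
            by_cases hpk : p.1 = k
            · have hval : d.getD p.1 [] = p.2 :=
                PySem.Dict.getD_of_mem_items d (by simpa using hpmem) hnd []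
              rw [hpk] at hval
              have hin : path ∈ p.2 := by rw [← hval]; exact hmem
              simp [pvAct_cons, hp, hpk, hactk, hin]
            · have h2 : ¬(k == p.1) = true := fun h => hpk (eq_of_beq h).symm
              simp [pvAct_cons, h2]
          · have hkmem : k ∈ d.keys := (PySem.Dict.contains_iff_mem_keys d k).mp hc
            simp only [List.map_cons, List.filter_cons]
            rw [pvTail dep iid k v rest d.keys hk]
            simp [hkmem]
        · -- path missing: A appends it via modify / B via the map pass
          have hstep' : pvAStep dep pb iid d (k, v) =
              d.insert k (d.getD k [] ++ [path]) := by
            rw [hstep]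
            have hcm : (d.modify k [] (fun w => w ++ [path])).contains k = true := by
              show (d.insert k _).contains k = true
              exact PySem.Dict.contains_insert_self ..
            simp [hc, hmem, hcm]
            rfl
          set d1 := d.insert k (d.getD k [] ++ [path]) with hd1
          have hkeys1 : d1.keys = d.keys := PySem.Dict.keys_insert_of_contains d _ hc
          have hnd1 : d1.keys.Nodup := hkeys1 ▸ hnd
          have hitems1 : d1.items = d.items.map
              (fun p => if p.1 == k then (k, d.getD k [] ++ [path]) else p) :=
            PySem.Dict.items_insert_of_contains d _ hc
          rw [List.foldl_cons, hstep', ih d1 hnd1 hrest]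
          congr 1
          · rw [hitems1, List.map_map]
            apply List.map_congr_left
            intro p hpmem
            by_cases hpk : p.1 = k
            · have hval : d.getD p.1 [] = p.2 :=
                PySem.Dict.getD_of_mem_items d (by simpa using hpmem) hnd []
              rw [hpk] at hval
              have hpc : path ∉ p.2 := by rw [← hval]; exact hmem
              simp [Function.comp, hpk, pvAct_cons, hp, hactk, hpc, hval]
            · have h1 : ¬(p.1 == k) = true := fun h => hpk (eq_of_beq h)
              have h2 : ¬(k == p.1) = true := fun h => hpk (eq_of_beq h).symm
              simp [Function.comp, h1, pvAct_cons, h2]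
          · rw [hkeys1]
            have hkmem : k ∈ d.keys := (PySem.Dict.contains_iff_mem_keys d k).mp hc
            simp only [List.map_cons, List.filter_cons]
            rw [pvTail dep iid k v rest d.keys hk]
            simp [hkmem]
      · -- no entry yet: A inserts a fresh one at the end
        have hcf : d.contains k = false := by simpa using hc
        have hstep' : pvAStep dep pb iid d (k, v) = d.insert k [path] := by
          rw [hstep]; simp [hcf]
        set d1 := d.insert k [path] with hd1
        have hkeys1 : d1.keys = d.keys ++ [k] := PySem.Dict.keys_insert_of_not_contains d _ hcf
        have hknot : k ∉ d.keys := by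
          intro hmemk
          have := (PySem.Dict.contains_iff_mem_keys (d := d) (k := k)).mpr hmemk
          rw [hcf] at this; exact Bool.false_ne_true this
        have hnd1 : d1.keys.Nodup := by
          rw [hkeys1]
          exact List.Nodup.append hnd (List.nodup_singleton k) (by simpa using hknot)
        have hitems1 : d1.items = d.items ++ [(k, [path])] :=
          PySem.Dict.items_insert_of_not_contains d _ hcf
        rw [List.foldl_cons, hstep', ih d1 hnd1 hrest, hitems1, hkeys1]
        have hmapeq : ∀ p ∈ d.items,
            (if pvAct dep iid rest p.1 && !(p.2.contains path) then (p.1, p.2 ++ [path]) else p)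
            = (if pvAct dep iid ((k, v) :: rest) p.1 && !(p.2.contains path)
               then (p.1, p.2 ++ [path]) else p) := by
          intro p hpmem
          have hpk : p.1 ≠ k := by
            intro h
            exact hknot (h ▸ PySem.Dict.mem_keys_of_mem_items d hpmem)
          have h2 : ¬(k == p.1) = true := fun h => hpk (eq_of_beq h).symm
          simp [pvAct_cons, h2]
        have hfiltereq :
            (rest.map Prod.fst).filter (fun c => pvAct dep iid rest c && !((d.keys ++ [k]).contains c))
            = (rest.map Prod.fst).filter (fun c => pvAct dep iid rest c && !(d.keys.contains c)) := by
          apply List.filter_congr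
          intro c hcmem
          have hck : ¬(c = k) := fun h => hk (h ▸ hcmem)
          simp [hck]
        simp only [List.map_cons, List.filter_cons]
        rw [pvTail dep iid k v rest d.keys hk, List.map_append,
            List.map_congr_left hmapeq, hfiltereq]
        simp [pvAct_cons, hp, hactk, hknot]
    · -- inactive head command: the step is the identity
      have hpf : pvPred dep iid (k, v) = false := by simpa using hp
      have hstep' : pvAStep dep pb iid d (k, v) = d := by
        simp only [pvPred, Bool.and_eq_false_iff] at hpf
        rcases hpf with h | h
        · simp only [pvAStep, h]
          simp
        · cases hdc : dep.contains k <;> simp only [pvAStep, hdc, h] <;> simp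
      rw [List.foldl_cons, hstep', ih d hnd hrest]
      congr 1
      · apply List.map_congr_left
        intro p _
        simp [pvAct_cons, hpf]
      · simp only [List.map_cons, List.filter_cons]
        rw [pvTail dep iid k v rest d.keys hk]
        simp [pvAct_cons, hpf, hactk]

-- ===== VERDICT (by name: the statement is the Claim_ definition above) =====
theorem validate_integration_commands_not_in_playbook_spec : Claim_equal_validate_integration_commands_not_in_playbook := by
  intro usage_dict dep c2i pb iid _ hpre
  obtain ⟨hnd, hc2i⟩ := hpre
  show _ = _
  unfold validate_integration_commands_not_in_playbook validate_integration_commands_not_in_playbook_alt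
  rw [pvMain dep pb iid _ rfl c2i (PySem.Dict.mk usage_dict) (by simpa using hnd) hc2i]
  have hset : ∀ (L : List String) (x : String),
      (PySem.Set.ofList L).contains x = L.contains x := by
    intro L x
    simp [pysem]
  simp only [pvAct, hset]
  rfl
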